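-- pv_equiv track=rewrite | github.com/mfascia/AdventOfCode | 2020/AoC_13.py | findNonCoprimePairs
-- ===== SOURCE A (Python) =====
-- def findNonCoprimePairs(values):
-- 	coprimes = []
-- 	for i in range(0, len(values)):
-- 		for j in range(i+1, len(values)):
-- 			num = max(values[i], values[j])
-- 			den = min(values[i], values[j])
-- 			if (num % den) == 0:
-- 				coprimes.append([i, j, values[i], values[j]])
-- 	return coprimes
-- ===== SOURCE B (Python) =====
-- def findNonCoprimePairs(values):
--     # Group indices by value, test divisibility once per pair of distinct values,
--     # emit all index pairs of each passing group pair, then sort.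
--     # Index pairs (i, j) are encoded as i*n + j so the sort is a flat int sort.
--     n = len(values)
--     positions = {}
--     for k, v in enumerate(values):
--         positions.setdefault(v, []).append(k)
--     distinct = list(positions)
--     enc = []
--     for a, u in enumerate(distinct):
--         pu = positions[u]
--         # equal values always divide each other; indices in pu are increasing
--         for x, p in enumerate(pu):
--             for q in pu[x + 1:]:
--                 enc.append(p * n + q)
--         for w in distinct[a + 1:]:
--             if max(u, w) % min(u, w) == 0:
--                 for p in pu:
--                     for q in positions[w]:
--                         enc.append(min(p, q) * n + max(p, q))
--     enc.sort()
--     return [[e // n, e % n, values[e // n], values[e % n]] for e in enc]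
-- ===== Notes on version B (the rewrite author's own statement) =====
-- stated objective: alternative
-- what changed: B buckets indices by value in one dict pass, runs the divisibility test once per pair of distinct values instead of once per pair of indices, expands each passing value pair into its index pairs (encoded i*n+j), and sorts the encodings to recover A's (i,j) order.
-- crash fix: On lists containing two or more zeros and no positive value, Python A raises ZeroDivisionError (0 % 0) while B returns the pair list, pairing the zeros with each other. — e.g. on findNonCoprimePairs([0, 0]): A raises ZeroDivisionError, B returns [[0, 1, 0, 0]]
import Mathlib
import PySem

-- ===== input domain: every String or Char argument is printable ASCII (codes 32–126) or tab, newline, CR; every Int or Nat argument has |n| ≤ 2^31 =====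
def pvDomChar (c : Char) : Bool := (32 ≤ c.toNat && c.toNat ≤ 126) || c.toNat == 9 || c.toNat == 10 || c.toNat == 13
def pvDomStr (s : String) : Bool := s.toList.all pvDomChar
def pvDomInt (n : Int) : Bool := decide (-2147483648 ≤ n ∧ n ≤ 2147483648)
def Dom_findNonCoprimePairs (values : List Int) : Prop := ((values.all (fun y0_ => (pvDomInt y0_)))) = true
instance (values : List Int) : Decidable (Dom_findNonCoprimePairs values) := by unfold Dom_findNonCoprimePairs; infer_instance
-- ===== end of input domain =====

-- B groups indices by value once, tests divisibility per pair of DISTINCT values, and sorts the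
-- emitted index pairs (encoded i*n+j), instead of A's divisibility test on every index pair.

-- ===== PORT A =====
def findNonCoprimePairs (values : List Int) : List (List Int) :=
  (PySem.List.pyRange 0 (values.length : Int) 1).foldl (fun acc i =>
    (PySem.List.pyRange (i + 1) (values.length : Int) 1).foldl (fun acc2 j =>
      let vi := PySem.List.pyGetD values i 0
      let vj := PySem.List.pyGetD values j 0
      let num := max vi vj
      let den := min vi vj
      if PySem.Int.mod num den = 0 then acc2 ++ [[i, j, vi, vj]] else acc2) acc) []

-- ===== PORT B =====
-- positions = {}; for k, v in enumerate(values): positions.setdefault(v, []).append(k)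
def pvGroups (values : List Int) : PySem.Dict Int (List Int) :=
  (PySem.List.enumerate values 0).foldl (fun d p => d.modify p.2 [] (fun l => l ++ [p.1])) PySem.Dict.empty

-- for x, p in enumerate(pu): for q in pu[x+1:]: enc.append(p*n+q)
def pvSameEnc (n : Int) : List Int → List Int
  | [] => []
  | p :: t => t.map (fun q => p * n + q) ++ pvSameEnc n t

-- for p in pu: for q in pw: enc.append(min(p,q)*n + max(p,q))
def pvCrossEnc (n : Int) (pu pw : List Int) : List Int :=
  pu.flatMap (fun p => pw.map (fun q => min p q * n + max p q))

-- the loop 'for a, u in enumerate(distinct): … for w in distinct[a+1:]: …' as head/tail recursion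
def pvCombine (g : PySem.Dict Int (List Int)) (n : Int) : List Int → List Int
  | [] => []
  | u :: rest =>
      pvSameEnc n (g.getD u []) ++
      rest.flatMap (fun w =>
        if PySem.Int.mod (max u w) (min u w) = 0 then
          pvCrossEnc n (g.getD u []) (g.getD w []) else []) ++
      pvCombine g n rest

def findNonCoprimePairs_alt (values : List Int) : List (List Int) :=
  let n : Int := values.length
  let g := pvGroups values
  let enc := pvCombine g n g.keys
  (PySem.List.sorted enc (fun e => e)).map (fun e =>
    [PySem.Int.floordiv e n, PySem.Int.mod e n,
     PySem.List.pyGetD values (PySem.Int.floordiv e n) 0,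
     PySem.List.pyGetD values (PySem.Int.mod e n) 0])

-- ===== PRECONDITION & SPEC =====
-- Pre_ excludes exactly the inputs where Python A raises ZeroDivisionError: a pair whose minimum
-- is 0, i.e. two zeros in the list, or a zero together with a positive value.
def Pre_findNonCoprimePairs (values : List Int) : Prop :=
  List.count 0 values ≤ 1 ∧ (0 ∈ values → ∀ x ∈ values, x ≤ 0)
instance (values : List Int) : Decidable (Pre_findNonCoprimePairs values) := by
  unfold Pre_findNonCoprimePairs; infer_instance

def pvWitness_findNonCoprimePairs : List Int := [2, 4, -3, 9]

-- On lists holding two or more zeros and no positive value, Python A raises ZeroDivisionError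
-- (0 % 0) while B returns the pairs, pairing the zeros with each other (a value divides itself).
def Raises_findNonCoprimePairs (values : List Int) : Prop :=
  2 ≤ List.count 0 values ∧ ∀ x ∈ values, x ≤ 0
instance (values : List Int) : Decidable (Raises_findNonCoprimePairs values) := by
  unfold Raises_findNonCoprimePairs; infer_instance
def pvRaiseWitness_findNonCoprimePairs : List Int := [0, 0]
def pvRaiseWitnessOut_findNonCoprimePairs : List (List Int) := [[0, 1, 0, 0]]

def Spec_findNonCoprimePairs (values : List Int) (out : List (List Int)) : Prop :=
  out = findNonCoprimePairs_alt values
instance (values : List Int) (out : List (List Int)) : Decidable (Spec_findNonCoprimePairs values out) := by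
  unfold Spec_findNonCoprimePairs; infer_instance

-- ===== CLAIM (what is proved, stated in full; the proofs are below) =====
def Claim_equal_findNonCoprimePairs : Prop := ∀ (values : List Int), Dom_findNonCoprimePairs values → Pre_findNonCoprimePairs values → Spec_findNonCoprimePairs values (findNonCoprimePairs values)
def Claim_raises_findNonCoprimePairs : Prop := (∀ (values : List Int), Dom_findNonCoprimePairs values → Raises_findNonCoprimePairs values → ¬ Pre_findNonCoprimePairs values) ∧ (Dom_findNonCoprimePairs (pvRaiseWitness_findNonCoprimePairs) ∧ Raises_findNonCoprimePairs (pvRaiseWitness_findNonCoprimePairs) ∧ findNonCoprimePairs_alt (pvRaiseWitness_findNonCoprimePairs) = pvRaiseWitnessOut_findNonCoprimePairs)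

-- ===== LEMMAS AND PROOFS =====

-- value read at an integer index
def pvVal (values : List Int) (i : Int) : Int := PySem.List.pyGetD values i 0

-- "index p holds value u"
def pvAt (values : List Int) (p u : Int) : Prop :=
  ∃ (k : Nat) (_ : k < values.length), p = (k : Int) ∧ values[k] = u

-- the indices holding value u, in increasing order
def pvIdx (values : List Int) (u : Int) : List Int :=
  ((PySem.List.enumerate values 0).filter (fun q => q.2 == u)).map (fun q => q.1)

-- A's accepted pairs in A's order, encoded as i*n+j
def pvEncA (values : List Int) : List Int :=
  (PySem.List.pyRange 0 (values.length : Int) 1).flatMap (fun i =>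
    ((PySem.List.pyRange (i + 1) (values.length : Int) 1).filter
        (fun j => decide (PySem.Int.mod (max (pvVal values i) (pvVal values j))
          (min (pvVal values i) (pvVal values j)) = 0))).map
      (fun j => i * (values.length : Int) + j))

-- the output row decoded from an encoding
def pvRow (values : List Int) (e : Int) : List Int :=
  [PySem.Int.floordiv e (values.length : Int), PySem.Int.mod e (values.length : Int),
   PySem.List.pyGetD values (PySem.Int.floordiv e (values.length : Int)) 0,
   PySem.List.pyGetD values (PySem.Int.mod e (values.length : Int)) 0]

theorem pvDecode {n i j : Int} (h0 : 0 ≤ i) (h1 : i < j) (h2 : j < n) :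
    PySem.Int.floordiv (i * n + j) n = i ∧ PySem.Int.mod (i * n + j) n = j := by
  have hn : 0 < n := by omega
  rw [PySem.Int.floordiv_eq_ediv_of_pos hn, PySem.Int.mod_eq_emod_of_pos hn]
  constructor
  · rw [add_comm, Int.add_mul_ediv_right _ _ (by omega : n ≠ 0),
      Int.ediv_eq_zero_of_lt (by omega) h2]
    omega
  · rw [add_comm, Int.add_mul_emod_self_right, Int.emod_eq_of_lt (by omega) h2]

theorem keys_groups (values : List Int) :
    (pvGroups values).keys = PySem.Set.ofList values := by
  unfold pvGroups
  rw [PySem.Dict.keys_foldl_modify_key (PySem.List.enumerate values 0) (fun p => p.2) []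
    (fun d p => (fun l => l ++ [p.1])) PySem.Dict.empty]
  simp [PySem.Set.update_nil_left, PySem.List.map_snd_enumerate]

theorem getD_groups (values : List Int) (u : Int) :
    (pvGroups values).getD u [] = pvIdx values u := by
  unfold pvGroups pvIdx
  have h : (PySem.List.enumerate values 0).foldl
      (fun d p => d.modify p.2 [] (fun l => l ++ [p.1])) PySem.Dict.empty
      = ((PySem.List.enumerate values 0).map Prod.swap).foldl
      (fun d p => d.modify p.1 [] (fun l => l ++ [p.2])) PySem.Dict.empty := by
    rw [List.foldl_map]
    rfl
  rw [h, PySem.Dict.getD_foldl_modify_append, PySem.Dict.getD_empty, List.nil_append,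
    List.filter_map, List.map_map]
  rfl

theorem mem_pvIdx (values : List Int) (u p : Int) :
    p ∈ pvIdx values u ↔ pvAt values p u := by
  unfold pvIdx pvAt
  simp only [List.mem_map, List.mem_filter, PySem.List.mem_enumerate_iff]
  constructor
  · rintro ⟨q, ⟨⟨k, hk, rfl⟩, hq⟩, rfl⟩
    exact ⟨k, hk, by omega, by simpa using hq⟩
  · rintro ⟨k, hk, rfl, hv⟩
    exact ⟨((k : Int), u), ⟨⟨k, hk, by simp [hv]⟩, by simp⟩, rfl⟩

theorem pairwise_pvIdx (values : List Int) (u : Int) :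
    (pvIdx values u).Pairwise (· < ·) := by
  unfold pvIdx
  rw [List.pairwise_map]
  exact (PySem.List.pairwise_lt_enumerate values 0).filter _

theorem pvAt_unique {values : List Int} {p u w : Int}
    (h1 : pvAt values p u) (h2 : pvAt values p w) : u = w := by
  obtain ⟨k, hk, rfl, rfl⟩ := h1
  obtain ⟨k', hk', he, rfl⟩ := h2
  have : k' = k := by omega
  subst this; rfl

theorem pvAt_bounds {values : List Int} {p u : Int} (h : pvAt values p u) :
    0 ≤ p ∧ p < (values.length : Int) := by
  obtain ⟨k, hk, rfl, _⟩ := h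
  omega

theorem pvAt_val {values : List Int} {p u : Int} (h : pvAt values p u) :
    PySem.List.pyGetD values p 0 = u := by
  obtain ⟨k, hk, rfl, rfl⟩ := h
  rw [PySem.List.pyGetD_natCast]
  exact List.getD_eq_getElem _ _ hk

theorem pvAt_of_bounds {values : List Int} {i : Int} (h0 : 0 ≤ i)
    (h1 : i < (values.length : Int)) : pvAt values i (PySem.List.pyGetD values i 0) := by
  refine ⟨i.toNat, by omega, by omega, ?_⟩
  have h2 : PySem.List.pyGetD values i 0 = values.getD i.toNat 0 := by
    conv_lhs => rw [show i = ((i.toNat : Nat) : Int) from by omega]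
    rw [PySem.List.pyGetD_natCast]
  rw [h2, List.getD_eq_getElem _ _ (by omega)]

theorem enc_inj {n p q p' q' : Int} (h0 : 0 ≤ p) (h1 : p < q) (h2 : q < n)
    (h0' : 0 ≤ p') (h1' : p' < q') (h2' : q' < n)
    (he : p * n + q = p' * n + q') : p = p' ∧ q = q' := by
  have hpq : (p - p') * n = q' - q := by ring_nf; linarith
  rcases lt_trichotomy p p' with h | h | h
  · nlinarith
  · constructor
    · exact h
    · nlinarith
  · nlinarith

theorem minmax_pair {a b c d : Int} (h1 : min a b = min c d) (h2 : max a b = max c d) :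
    (a = c ∧ b = d) ∨ (a = d ∧ b = c) := by omega

theorem mem_pvSameEnc {n e : Int} {l : List Int} (hl : l.Pairwise (· < ·)) :
    e ∈ pvSameEnc n l ↔ ∃ p q, p ∈ l ∧ q ∈ l ∧ p < q ∧ e = p * n + q := by
  induction l with
  | nil => simp [pvSameEnc]
  | cons p t ih =>
    rw [List.pairwise_cons] at hl
    simp only [pvSameEnc, List.mem_append, List.mem_map, ih hl.2]
    constructor
    · rintro (⟨q, hq, rfl⟩ | ⟨a, b, ha, hb, hab, rfl⟩)
      · exact ⟨p, q, List.mem_cons_self, List.mem_cons_of_mem _ hq, hl.1 q hq, rfl⟩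
      · exact ⟨a, b, List.mem_cons_of_mem _ ha, List.mem_cons_of_mem _ hb, hab, rfl⟩
    · rintro ⟨a, b, ha, hb, hab, rfl⟩
      rcases List.mem_cons.1 ha with rfl | ha'
      · left
        refine ⟨b, ?_, rfl⟩
        rcases List.mem_cons.1 hb with rfl | hb'
        · omega
        · exact hb'
      · right
        refine ⟨a, b, ha', ?_, hab, rfl⟩
        rcases List.mem_cons.1 hb with rfl | hb'
        · exact absurd (hl.1 a ha') (by omega)
        · exact hb'

theorem pairwise_pvSameEnc {n : Int} {l : List Int} (hl : l.Pairwise (· < ·))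
    (hb : ∀ x ∈ l, 0 ≤ x ∧ x < n) : (pvSameEnc n l).Pairwise (· < ·) := by
  induction l with
  | nil => exact List.Pairwise.nil
  | cons p t ih =>
    rw [List.pairwise_cons] at hl
    rw [pvSameEnc, List.pairwise_append]
    refine ⟨?_, ih hl.2 (fun x hx => hb x (List.mem_cons_of_mem _ hx)), ?_⟩
    · rw [List.pairwise_map]
      exact hl.2.imp (by omega)
    · intro x hx y hy
      obtain ⟨q, hq, rfl⟩ := List.mem_map.1 hx
      obtain ⟨a, b, ha, hb', hab, rfl⟩ := (mem_pvSameEnc hl.2).1 hy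
      have h1 := hl.1 a ha
      have h2 := hb q (List.mem_cons_of_mem _ hq)
      have h3 := hb b (List.mem_cons_of_mem _ hb')
      nlinarith


theorem A_eq (values : List Int) :
    findNonCoprimePairs values = (pvEncA values).map (pvRow values) := by
  unfold findNonCoprimePairs pvEncA
  simp only [PySem.List.foldl_append_ite, PySem.List.foldl_append_eq_flatMap, List.nil_append,
    List.map_flatMap, List.map_map]
  apply List.flatMap_congr
  intro i hi
  apply List.map_congr_left
  intro j hj
  rw [List.mem_filter] at hj
  have hi' := PySem.List.mem_pyRange_one.1 hi
  have hj' := PySem.List.mem_pyRange_one.1 hj.1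
  obtain ⟨hd, hm⟩ := pvDecode (n := (values.length : Int)) (i := i) (j := j)
    (by omega) (by omega) (by omega)
  simp only [Function.comp, pvRow, hd, hm]

theorem B_eq (values : List Int) :
    findNonCoprimePairs_alt values =
      (PySem.List.sorted (pvCombine (pvGroups values) (values.length : Int) (pvGroups values).keys)
        (fun e => e)).map (fun e =>
          [PySem.Int.floordiv e (values.length : Int), PySem.Int.mod e (values.length : Int),
           PySem.List.pyGetD values (PySem.Int.floordiv e (values.length : Int)) 0,
           PySem.List.pyGetD values (PySem.Int.mod e (values.length : Int)) 0]) := rfl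

theorem combine_cons (g : PySem.Dict Int (List Int)) (n u : Int) (rest : List Int) :
    pvCombine g n (u :: rest) =
      pvSameEnc n (g.getD u []) ++
      rest.flatMap (fun w =>
        if PySem.Int.mod (max u w) (min u w) = 0 then
          pvCrossEnc n (g.getD u []) (g.getD w []) else []) ++
      pvCombine g n rest := rfl

theorem crossEnc_eq (n : Int) (pu pw : List Int) :
    pvCrossEnc n pu pw = (pu ×ˢ pw).map (fun r => min r.1 r.2 * n + max r.1 r.2) := by
  have h : (pu ×ˢ pw) = pu.flatMap (fun p => pw.map (Prod.mk p)) := rfl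
  rw [pvCrossEnc, h, List.map_flatMap]
  simp [List.map_map]
  rfl

theorem mem_crossEnc {n e : Int} {pu pw : List Int} :
    e ∈ pvCrossEnc n pu pw ↔ ∃ p q, p ∈ pu ∧ q ∈ pw ∧ e = min p q * n + max p q := by
  simp [pvCrossEnc]
  tauto

theorem same_elem {values : List Int} {n u e : Int}
    (he : e ∈ pvSameEnc n (pvIdx values u)) :
    ∃ p q, pvAt values p u ∧ pvAt values q u ∧ p < q ∧ e = p * n + q := by
  obtain ⟨p, q, hp, hq, hpq, rfl⟩ := (mem_pvSameEnc (pairwise_pvIdx values u)).1 he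
  exact ⟨p, q, (mem_pvIdx values u p).1 hp, (mem_pvIdx values u q).1 hq, hpq, rfl⟩

theorem cross_elem {values : List Int} {n u w e : Int} (huw : u ≠ w)
    (he : e ∈ pvCrossEnc n (pvIdx values u) (pvIdx values w)) :
    ∃ p q a b, pvAt values p a ∧ pvAt values q b ∧ p < q ∧ e = p * n + q ∧
      ((a = u ∧ b = w) ∨ (a = w ∧ b = u)) := by
  obtain ⟨p, q, hp, hq, rfl⟩ := mem_crossEnc.1 he
  rw [mem_pvIdx] at hp hq
  have hpq : p ≠ q := fun h => huw (pvAt_unique (h ▸ hp) hq)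
  by_cases h : p < q
  · exact ⟨p, q, u, w, hp, hq, h,
      by rw [min_eq_left (le_of_lt h), max_eq_right (le_of_lt h)], Or.inl ⟨rfl, rfl⟩⟩
  · exact ⟨q, p, w, u, hq, hp, by omega,
      by rw [min_eq_right (by omega : q ≤ p), max_eq_left (by omega : q ≤ p)], Or.inr ⟨rfl, rfl⟩⟩

theorem crossflat_elem {values : List Int} {n u e : Int} {rest : List Int} (hu : u ∉ rest)
    (he : e ∈ rest.flatMap (fun w =>
      if PySem.Int.mod (max u w) (min u w) = 0 then
        pvCrossEnc n (pvIdx values u) (pvIdx values w) else [])) :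
    ∃ p q a b, pvAt values p a ∧ pvAt values q b ∧ p < q ∧ e = p * n + q ∧
      ((a = u ∧ b ∈ rest) ∨ (b = u ∧ a ∈ rest)) := by
  obtain ⟨w, hw, hee⟩ := List.mem_flatMap.1 he
  split_ifs at hee with hc
  · have huw : u ≠ w := fun h => hu (h ▸ hw)
    obtain ⟨p, q, a, b, hp, hq, hpq, rfl, hab⟩ := cross_elem huw hee
    rcases hab with ⟨rfl, rfl⟩ | ⟨rfl, rfl⟩
    · exact ⟨p, q, _, _, hp, hq, hpq, rfl, Or.inl ⟨rfl, hw⟩⟩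
    · exact ⟨p, q, _, _, hp, hq, hpq, rfl, Or.inr ⟨rfl, hw⟩⟩
  · simp at hee

theorem combine_elem {values : List Int} {n e : Int} {D : List Int} (hD : D.Nodup)
    (he : e ∈ pvCombine (pvGroups values) n D) :
    ∃ p q a b, pvAt values p a ∧ pvAt values q b ∧ p < q ∧ e = p * n + q ∧
      a ∈ D ∧ b ∈ D := by
  induction D with
  | nil => simp [pvCombine] at he
  | cons u rest ih =>
    rw [combine_cons, List.append_assoc, List.mem_append, List.mem_append] at he
    rw [List.nodup_cons] at hD
    rcases he with hs | hc | hr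
    · rw [getD_groups] at hs
      obtain ⟨p, q, hp, hq, hpq, rfl⟩ := same_elem hs
      exact ⟨p, q, u, u, hp, hq, hpq, rfl, List.mem_cons_self, List.mem_cons_self⟩
    · simp only [getD_groups] at hc
      obtain ⟨p, q, a, b, hp, hq, hpq, rfl, hab⟩ := crossflat_elem hD.1 hc
      rcases hab with ⟨rfl, hb⟩ | ⟨rfl, ha⟩
      · exact ⟨p, q, _, b, hp, hq, hpq, rfl, List.mem_cons_self, List.mem_cons_of_mem _ hb⟩
      · exact ⟨p, q, a, _, hp, hq, hpq, rfl, List.mem_cons_of_mem _ ha, List.mem_cons_self⟩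
    · obtain ⟨p, q, a, b, hp, hq, hpq, rfl, ha, hb⟩ := ih hD.2 hr
      exact ⟨p, q, a, b, hp, hq, hpq, rfl, List.mem_cons_of_mem _ ha, List.mem_cons_of_mem _ hb⟩

theorem pair_sublist_of_nodup {l : List Int} {a b : Int} (hl : l.Nodup)
    (ha : a ∈ l) (hb : b ∈ l) (hab : a ≠ b) :
    [a, b].Sublist l ∨ [b, a].Sublist l := by
  induction l with
  | nil => simp at ha
  | cons x t ih =>
    rw [List.nodup_cons] at hl
    rcases List.mem_cons.1 ha with rfl | ha'
    · left
      have : b ∈ t := by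
        rcases List.mem_cons.1 hb with rfl | h
        · exact absurd rfl hab
        · exact h
      exact List.Sublist.cons₂ _ (List.singleton_sublist.2 this)
    · rcases List.mem_cons.1 hb with rfl | hb'
      · right
        exact List.Sublist.cons₂ _ (List.singleton_sublist.2 ha')
      · rcases ih hl.2 ha' hb' with h | h
        · exact Or.inl (h.cons _)
        · exact Or.inr (h.cons _)

theorem mem_combine_iff {g : PySem.Dict Int (List Int)} {n e : Int} {D : List Int} :
    e ∈ pvCombine g n D ↔
      (∃ u ∈ D, e ∈ pvSameEnc n (g.getD u [])) ∨
      (∃ u w, [u, w].Sublist D ∧ PySem.Int.mod (max u w) (min u w) = 0 ∧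
        e ∈ pvCrossEnc n (g.getD u []) (g.getD w [])) := by
  induction D with
  | nil =>
    simp only [pvCombine, List.not_mem_nil, false_iff]
    rintro (⟨u, h, _⟩ | ⟨u, w, h, _⟩)
    · simp at h
    · simp at h
  | cons u rest ih =>
    rw [combine_cons, List.append_assoc, List.mem_append, List.mem_append, ih]
    constructor
    · rintro (hs | hc | ⟨u', hu', hs⟩ | ⟨u', w', hsub, hcond, hcr⟩)
      · exact Or.inl ⟨u, List.mem_cons_self, hs⟩
      · obtain ⟨w, hw, hee⟩ := List.mem_flatMap.1 hc
        split_ifs at hee with hcond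
        · exact Or.inr ⟨u, w, List.Sublist.cons₂ _ (List.singleton_sublist.2 hw), hcond, hee⟩
        · simp at hee
      · exact Or.inl ⟨u', List.mem_cons_of_mem _ hu', hs⟩
      · exact Or.inr ⟨u', w', hsub.cons _, hcond, hcr⟩
    · rintro (⟨u', hu', hs⟩ | ⟨u', w', hsub, hcond, hcr⟩)
      · rcases List.mem_cons.1 hu' with rfl | h
        · exact Or.inl hs
        · exact Or.inr (Or.inr (Or.inl ⟨u', h, hs⟩))
      · rcases List.sublist_cons_iff.1 hsub with h | ⟨r, hr, hrs⟩
        · exact Or.inr (Or.inr (Or.inr ⟨u', w', h, hcond, hcr⟩))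
        · have : u' = u ∧ r = [w'] := by
            constructor
            · exact (List.cons.injEq _ _ _ _ ▸ hr).1
            · exact (List.cons.injEq _ _ _ _ ▸ hr).2.symm
          obtain ⟨rfl, rfl⟩ := this
          have hw' : w' ∈ rest := List.singleton_sublist.1 hrs
          refine Or.inr (Or.inl (List.mem_flatMap.2 ⟨w', hw', ?_⟩))
          rw [if_pos hcond]
          exact hcr

theorem mem_pvEncA {values : List Int} {e : Int} :
    e ∈ pvEncA values ↔ ∃ i j : Int, 0 ≤ i ∧ i < j ∧ j < (values.length : Int) ∧
      PySem.Int.mod (max (pvVal values i) (pvVal values j))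
        (min (pvVal values i) (pvVal values j)) = 0 ∧
      e = i * (values.length : Int) + j := by
  unfold pvEncA
  simp only [List.mem_flatMap, List.mem_map, List.mem_filter, PySem.List.mem_pyRange_one,
    decide_eq_true_eq]
  constructor
  · rintro ⟨i, ⟨hi0, hin⟩, j, ⟨⟨hj1, hj2⟩, hc⟩, rfl⟩
    exact ⟨i, j, hi0, by omega, hj2, hc, rfl⟩
  · rintro ⟨i, j, h0, h1, h2, hc, rfl⟩
    exact ⟨i, ⟨h0, by omega⟩, j, ⟨⟨by omega, h2⟩, hc⟩, rfl⟩

theorem slots_eq {values : List Int} {p q p' q' a b a' b' : Int}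
    (hp : pvAt values p a) (hq : pvAt values q b) (h1 : p < q)
    (hp' : pvAt values p' a') (hq' : pvAt values q' b') (h1' : p' < q')
    (he : p * (values.length : Int) + q = p' * (values.length : Int) + q') :
    p = p' ∧ q = q' :=
  enc_inj (pvAt_bounds hp).1 h1 (pvAt_bounds hq).2
    (pvAt_bounds hp').1 h1' (pvAt_bounds hq').2 he

theorem mem_combine_encA {values : List Int} {e : Int} :
    e ∈ pvCombine (pvGroups values) ((values.length : Int)) (pvGroups values).keys ↔
      e ∈ pvEncA values := by
  have hkeys : (pvGroups values).keys = PySem.Set.ofList values := keys_groups values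
  have hnd : (pvGroups values).keys.Nodup := by
    rw [hkeys]; exact PySem.Set.nodup_ofList values
  rw [mem_combine_iff, mem_pvEncA]
  constructor
  · rintro (⟨u, hu, hs⟩ | ⟨u, w, hsub, hcond, hcr⟩)
    · rw [getD_groups] at hs
      obtain ⟨p, q, hp, hq, hpq, rfl⟩ := same_elem hs
      have hb1 := pvAt_bounds hp
      have hb2 := pvAt_bounds hq
      refine ⟨p, q, hb1.1, hpq, hb2.2, ?_, rfl⟩
      have e1 : pvVal values p = u := pvAt_val hp
      have e2 : pvVal values q = u := pvAt_val hq
      rw [e1, e2, max_self, min_self, PySem.Int.mod_eq_zero_iff_dvd]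
    · simp only [getD_groups] at hcr
      have huw : u ≠ w := by
        have h2 := hnd.sublist hsub
        simp [List.nodup_cons] at h2
        exact h2
      obtain ⟨p, q, a, b, hp, hq, hpq, rfl, hab⟩ := cross_elem huw hcr
      have hb1 := pvAt_bounds hp
      have hb2 := pvAt_bounds hq
      have e1 : pvVal values p = a := pvAt_val hp
      have e2 : pvVal values q = b := pvAt_val hq
      refine ⟨p, q, hb1.1, hpq, hb2.2, ?_, rfl⟩
      rw [e1, e2]
      rcases hab with ⟨rfl, rfl⟩ | ⟨rfl, rfl⟩
      · exact hcond
      · rw [max_comm, min_comm]; exact hcond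
  · rintro ⟨i, j, h0, h1, h2, hc, rfl⟩
    have hAi : pvAt values i (pvVal values i) := pvAt_of_bounds h0 (by omega)
    have hAj : pvAt values j (pvVal values j) := pvAt_of_bounds (by omega) h2
    have hui : pvVal values i ∈ values := by
      obtain ⟨k, hk, _, hv⟩ := hAi
      exact hv ▸ List.getElem_mem hk
    have huj : pvVal values j ∈ values := by
      obtain ⟨k, hk, _, hv⟩ := hAj
      exact hv ▸ List.getElem_mem hk
    have hki : pvVal values i ∈ (pvGroups values).keys := by
      rw [hkeys]; exact (PySem.Set.mem_ofList values _).2 hui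
    have hkj : pvVal values j ∈ (pvGroups values).keys := by
      rw [hkeys]; exact (PySem.Set.mem_ofList values _).2 huj
    by_cases huw : pvVal values i = pvVal values j
    · refine Or.inl ⟨pvVal values i, hki, ?_⟩
      rw [getD_groups, mem_pvSameEnc (pairwise_pvIdx values _)]
      exact ⟨i, j, (mem_pvIdx _ _ _).2 hAi, (mem_pvIdx _ _ _).2 (huw ▸ hAj), h1, rfl⟩
    · rcases pair_sublist_of_nodup hnd hki hkj huw with hs | hs
      · refine Or.inr ⟨_, _, hs, hc, ?_⟩
        rw [getD_groups, getD_groups, mem_crossEnc]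
        exact ⟨i, j, (mem_pvIdx _ _ _).2 hAi, (mem_pvIdx _ _ _).2 hAj,
          by rw [min_eq_left (by omega), max_eq_right (by omega)]⟩
      · refine Or.inr ⟨_, _, hs, by rw [max_comm, min_comm]; exact hc, ?_⟩
        rw [getD_groups, getD_groups, mem_crossEnc]
        exact ⟨j, i, (mem_pvIdx _ _ _).2 hAj, (mem_pvIdx _ _ _).2 hAi,
          by rw [min_eq_right (by omega), max_eq_left (by omega)]⟩

theorem nodup_idx (values : List Int) (u : Int) : (pvIdx values u).Nodup :=
  (pairwise_pvIdx values u).imp ne_of_lt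

theorem nodup_sameEnc (values : List Int) (u : Int) :
    (pvSameEnc ((values.length : Int)) (pvIdx values u)).Nodup :=
  (pairwise_pvSameEnc (pairwise_pvIdx values u)
    (fun _ hx => pvAt_bounds ((mem_pvIdx _ _ _).1 hx))).imp ne_of_lt

theorem nodup_crossEnc {values : List Int} {u w : Int} (huw : u ≠ w) :
    (pvCrossEnc ((values.length : Int)) (pvIdx values u) (pvIdx values w)).Nodup := by
  rw [crossEnc_eq]
  refine List.Nodup.map_on ?_ ((nodup_idx values u).product (nodup_idx values w))
  rintro ⟨p, q⟩ hpq ⟨p', q'⟩ hpq' hee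
  have hm1 := List.pair_mem_product.mp hpq
  have hm2 := List.pair_mem_product.mp hpq'
  dsimp only at hee
  have hp := (mem_pvIdx _ _ _).1 hm1.1
  have hq := (mem_pvIdx _ _ _).1 hm1.2
  have hp' := (mem_pvIdx _ _ _).1 hm2.1
  have hq' := (mem_pvIdx _ _ _).1 hm2.2
  have hne : p ≠ q := fun h => huw (pvAt_unique (h ▸ hp) hq)
  have hne' : p' ≠ q' := fun h => huw (pvAt_unique (h ▸ hp') hq')
  have b1 := pvAt_bounds hp
  have b2 := pvAt_bounds hq
  have b1' := pvAt_bounds hp'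
  have b2' := pvAt_bounds hq'
  have hmm := enc_inj (n := (values.length : Int))
    (by omega : (0:Int) ≤ min p q) (by omega : min p q < max p q) (by omega : max p q < (values.length : Int))
    (by omega : (0:Int) ≤ min p' q') (by omega : min p' q' < max p' q') (by omega : max p' q' < (values.length : Int)) hee
  rcases minmax_pair hmm.1 hmm.2 with ⟨h3, h4⟩ | ⟨h3, h4⟩
  · rw [Prod.mk.injEq]; exact ⟨h3, h4⟩
  · exact absurd (pvAt_unique (h3 ▸ hp) hq') (fun h => huw h)

theorem nodup_crossflat {values : List Int} {u : Int} {rest : List Int}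
    (hu : u ∉ rest) (hrest : rest.Nodup) :
    (rest.flatMap (fun w =>
      if PySem.Int.mod (max u w) (min u w) = 0 then
        pvCrossEnc ((values.length : Int)) (pvIdx values u) (pvIdx values w) else [])).Nodup := by
  induction rest with
  | nil => simp
  | cons w rest' ih =>
    rw [List.nodup_cons] at hrest
    have hu' : u ∉ rest' := fun h => hu (List.mem_cons_of_mem _ h)
    have huw : u ≠ w := fun h => hu (h ▸ List.mem_cons_self)
    rw [List.flatMap_cons, List.nodup_append]
    refine ⟨?_, ih hu' hrest.2, ?_⟩
    · split_ifs
      · exact nodup_crossEnc huw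
      · exact List.nodup_nil
    · intro x hx y hy hxy
      subst hxy
      split_ifs at hx with hcx
      · obtain ⟨p, q, a, b, hp, hq, h1, he1, hab⟩ := cross_elem huw hx
        obtain ⟨p', q', a', b', hp', hq', h1', he2, hab'⟩ := crossflat_elem hu' hy
        obtain ⟨rfl, rfl⟩ := slots_eq hp hq h1 hp' hq' h1' (he1 ▸ he2)
        have ha := pvAt_unique hp hp'
        have hb := pvAt_unique hq hq'
        rcases hab with ⟨rfl, rfl⟩ | ⟨rfl, rfl⟩ <;> rcases hab' with ⟨rfl, hb'⟩ | ⟨rfl, ha'⟩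
        · exact hrest.1 (hb ▸ hb')
        · exact hu' (ha ▸ ha')
        · exact huw (ha.symm)
        · exact hrest.1 (ha ▸ ha')
      · simp at hx

theorem nodup_combine {values : List Int} {D : List Int} (hD : D.Nodup) :
    (pvCombine (pvGroups values) ((values.length : Int)) D).Nodup := by
  induction D with
  | nil => simp [pvCombine]
  | cons u rest ih =>
    rw [List.nodup_cons] at hD
    rw [combine_cons, List.append_assoc, List.nodup_append]
    simp only [getD_groups]
    refine ⟨nodup_sameEnc values u, ?_, ?_⟩
    · rw [List.nodup_append]
      refine ⟨nodup_crossflat hD.1 hD.2, ih hD.2, ?_⟩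
      · intro x hx y hy hxy
        subst hxy
        obtain ⟨p, q, a, b, hp, hq, h1, he1, hab⟩ := crossflat_elem hD.1 hx
        obtain ⟨p', q', a', b', hp', hq', h1', he2, ha', hb'⟩ := combine_elem hD.2 hy
        obtain ⟨rfl, rfl⟩ := slots_eq hp hq h1 hp' hq' h1' (he1 ▸ he2)
        have hae := pvAt_unique hp hp'
        have hbe := pvAt_unique hq hq'
        rcases hab with ⟨rfl, _⟩ | ⟨rfl, _⟩
        · exact hD.1 (hae ▸ ha')
        · exact hD.1 (hbe ▸ hb')
    · intro x hx y hy hxy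
      subst hxy
      obtain ⟨p, q, hp, hq, h1, he1⟩ := same_elem hx
      rcases List.mem_append.1 hy with hyc | hyr
      · obtain ⟨p', q', a', b', hp', hq', h1', he2, hab'⟩ := crossflat_elem hD.1 hyc
        obtain ⟨rfl, rfl⟩ := slots_eq hp hq h1 hp' hq' h1' (he1 ▸ he2)
        have hae := pvAt_unique hp hp'
        have hbe := pvAt_unique hq hq'
        rcases hab' with ⟨rfl, hb'⟩ | ⟨rfl, ha'⟩
        · exact hD.1 (hbe ▸ hb')
        · exact hD.1 (hae ▸ ha')
      · obtain ⟨p', q', a', b', hp', hq', h1', he2, ha', hb'⟩ := combine_elem hD.2 hyr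
        obtain ⟨rfl, rfl⟩ := slots_eq hp hq h1 hp' hq' h1' (he1 ▸ he2)
        exact hD.1 ((pvAt_unique hp hp') ▸ ha')

theorem pairwise_encA (values : List Int) : (pvEncA values).Pairwise (· < ·) := by
  unfold pvEncA
  rw [List.pairwise_flatMap]
  constructor
  · intro i _
    rw [List.pairwise_map]
    exact ((PySem.List.pairwise_lt_pyRange_one _ _).filter _).imp (by omega)
  · refine ((PySem.List.pairwise_lt_pyRange_one _ _).imp_of_mem ?_)
    intro i1 i2 hi1 hi2 h12 x hx y hy
    obtain ⟨j1, hj1, rfl⟩ := List.mem_map.1 hx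
    obtain ⟨j2, hj2, rfl⟩ := List.mem_map.1 hy
    have hb1 := PySem.List.mem_pyRange_one.1 (List.mem_filter.1 hj1).1
    have hb2 := PySem.List.mem_pyRange_one.1 (List.mem_filter.1 hj2).1
    have hA := PySem.List.mem_pyRange_one.1 hi1
    have hB := PySem.List.mem_pyRange_one.1 hi2
    have hx1 : i1 * (values.length : Int) + j1 < (i1 + 1) * (values.length : Int) := by nlinarith
    have hx2 : (i1 + 1) * (values.length : Int) ≤ i2 * (values.length : Int) :=
      mul_le_mul_of_nonneg_right (by omega) (by omega)
    have hx3 : i2 * (values.length : Int) < i2 * (values.length : Int) + j2 := by omega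
    linarith

theorem main_sorted (values : List Int) :
    PySem.List.sorted (pvCombine (pvGroups values) (values.length : Int) (pvGroups values).keys)
      (fun e => e) = pvEncA values := by
  have hnd : (pvGroups values).keys.Nodup := by
    rw [keys_groups values]; exact PySem.Set.nodup_ofList values
  apply PySem.List.sorted_id_eq_of_perm_of_pairwise
  · exact (List.perm_ext_iff_of_nodup ((pairwise_encA values).imp ne_of_lt)
      (nodup_combine hnd)).2 (fun a => mem_combine_encA.symm)
  · exact (pairwise_encA values).imp le_of_lt

-- ===== VERDICT (by name: the statement is the Claim_ definition above) =====
theorem findNonCoprimePairs_spec : Claim_equal_findNonCoprimePairs := by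
  intro values _ _
  unfold Spec_findNonCoprimePairs
  rw [A_eq, B_eq, main_sorted]
  rfl

@[simp] theorem findNonCoprimePairs_raises : Claim_raises_findNonCoprimePairs := by
  unfold Claim_raises_findNonCoprimePairs
  constructor
  · intro values _ hr hp
    unfold Raises_findNonCoprimePairs at hr
    unfold Pre_findNonCoprimePairs at hp
    omega
  · refine ⟨by decide, by decide, by decide⟩
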